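-- pv_equiv track=rewrite | github.com/tylerbessire/PUMA-Program-Understanding-Meta-learning-Architecture | arc_solver/genomic/hilbert.py | morton_order
-- ===== SOURCE A (Python) =====
-- from typing import List, Tuple, Dict
--
-- def morton_order(height: int, width: int) -> List[Tuple[int, int]]:
--     """
--     Alternative space-filling curve (Morton/Z-order) for comparison.
--     Can be used as a fallback when Hilbert curve doesn't work well.
--     """
--     coords = []
--     max_dim = max(height, width)
--     n = 1
--     while n < max_dim:
--         n *= 2
--
--     for i in range(n * n):
--         y, x = _morton_decode(i)
--         if y < height and x < width:
--             coords.append((y, x))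
--
--     return coords
--
-- def _morton_decode(z: int) -> Tuple[int, int]:
--     """Decode Morton (Z-order) index to (y, x) coordinates."""
--     x = y = 0
--     for i in range(16):  # Sufficient for reasonable grid sizes
--         x |= (z & (1 << (2 * i))) >> i
--         y |= (z & (1 << (2 * i + 1))) >> (i + 1)
--     return (y, x)
-- ===== SOURCE B (Python) =====
-- from typing import List, Tuple
--
--
-- def morton_order(height: int, width: int) -> List[Tuple[int, int]]:
--     """
--     Morton (Z-order) traversal of the height x width grid, generated by
--     recursive quadrant subdivision with pruning of quadrants that lie
--     entirely outside the grid (instead of scanning all n*n Morton indices).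
--     """
--     n = 1
--     while n < max(height, width):
--         n *= 2
--     return _z_quadrants(n, 0, 0, height, width)
--
--
-- def _z_quadrants(size: int, y0: int, x0: int, height: int, width: int) -> List[Tuple[int, int]]:
--     if y0 >= height or x0 >= width:
--         return []
--     if size <= 1:
--         return [(y0, x0)]
--     h = size // 2
--     return (_z_quadrants(h, y0, x0, height, width)
--             + _z_quadrants(h, y0, x0 + h, height, width)
--             + _z_quadrants(h, y0 + h, x0, height, width)
--             + _z_quadrants(h, y0 + h, x0 + h, height, width))
-- ===== Notes on version B (the rewrite author's own statement) =====
-- stated objective: faster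
-- what changed: Instead of scanning all n*n Morton indices and bit-decoding each one with a 16-iteration loop, B generates the same Z-order traversal by recursive quadrant subdivision of the 2^k x 2^k square, pruning every quadrant that lies entirely outside the height x width grid.
-- outside the precondition, e.g. on morton_order(0, 70000): A does not finish within the time limit, B returns []
import Mathlib
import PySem

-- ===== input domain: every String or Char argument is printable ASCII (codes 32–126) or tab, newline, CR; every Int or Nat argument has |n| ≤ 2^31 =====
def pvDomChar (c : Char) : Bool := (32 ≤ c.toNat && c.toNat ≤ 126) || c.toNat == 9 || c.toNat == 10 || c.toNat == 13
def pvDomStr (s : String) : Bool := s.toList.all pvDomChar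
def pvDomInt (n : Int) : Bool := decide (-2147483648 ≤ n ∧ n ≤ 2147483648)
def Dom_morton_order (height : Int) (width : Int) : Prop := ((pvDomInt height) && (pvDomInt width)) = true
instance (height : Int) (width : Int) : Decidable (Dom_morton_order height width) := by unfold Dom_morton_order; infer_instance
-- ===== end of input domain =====

-- B replaces A's scan of all n*n Morton indices (16-bit decode per index) by recursive
-- Z-order quadrant subdivision that prunes quadrants lying outside the grid (measured faster).

-- ===== PORT A =====
-- _morton_decode: `for i in range(16)`: the loop counter is a plain nonnegative shift
-- amount, ported as the Nat range 0..15 (Python shifts by a nonnegative int; exact here).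
def mortonDecodeA (z : Int) : Int × Int :=
  let p := (List.range 16).foldl
    (fun (p : Int × Int) (i : Nat) =>
      (PySem.Int.bor p.1 ((PySem.Int.band z ((1 : Int) <<< (2 * i))) >>> i),
       PySem.Int.bor p.2 ((PySem.Int.band z ((1 : Int) <<< (2 * i + 1))) >>> (i + 1))))
    ((0 : Int), (0 : Int))
  (p.2, p.1)

-- the `n = 1; while n < max_dim: n *= 2` preamble, present verbatim in both A and Source B,
-- so both ports call this one helper.  The `0 < n` conjunct only provides the
-- termination measure; every call starts from n = 1, where it always holds on the way.
def pvGrow (maxDim : Int) (n : Int) : Int :=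
  if _h : 0 < n ∧ n < maxDim then pvGrow maxDim (n * 2) else n
termination_by (maxDim - n).toNat
decreasing_by omega

def morton_order (height : Int) (width : Int) : List (Int × Int) :=
  let max_dim := max height width
  let n := pvGrow max_dim 1
  (PySem.List.pyRange 0 (n * n) 1).foldl
    (fun coords i =>
      let yx := mortonDecodeA i
      if yx.1 < height ∧ yx.2 < width then coords ++ [yx] else coords) []

-- ===== PORT B =====
def zQuadrants (size y0 x0 height width : Int) : List (Int × Int) :=
  if y0 ≥ height ∨ x0 ≥ width then []
  else if size ≤ 1 then [(y0, x0)]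
  else
    let h := PySem.Int.floordiv size 2
    zQuadrants h y0 x0 height width ++ zQuadrants h y0 (x0 + h) height width ++
      zQuadrants h (y0 + h) x0 height width ++ zQuadrants h (y0 + h) (x0 + h) height width
termination_by size.toNat
decreasing_by
  all_goals
    rw [PySem.Int.floordiv_eq_ediv_of_pos (by omega : (0:Int) < 2)]
    omega

def morton_order_alt (height : Int) (width : Int) : List (Int × Int) :=
  let n := pvGrow (max height width) 1
  zQuadrants n 0 0 height width

-- ===== PRECONDITION & SPEC =====
-- Pre_ excludes dimensions above 2^16: there A's 16-bit _morton_decode no longer inverts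
-- the Morton index (the n·n scan revisits cells), and the scan of n·n ≥ 2^34 indices
-- never finishes in practice.
def Pre_morton_order (height : Int) (width : Int) : Prop := height ≤ 65536 ∧ width ≤ 65536
instance (height : Int) (width : Int) : Decidable (Pre_morton_order height width) := by unfold Pre_morton_order; infer_instance
def pvWitness_morton_order : Int × Int := (5, 3)

def Spec_morton_order (height : Int) (width : Int) (out : List (Int × Int)) : Prop := out = morton_order_alt height width
instance (height : Int) (width : Int) (out : List (Int × Int)) : Decidable (Spec_morton_order height width out) := by unfold Spec_morton_order; infer_instance

-- ===== CLAIM (what is proved, stated in full; the proofs are below) =====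
def Claim_equal_morton_order : Prop := ∀ (height : Int) (width : Int), Dom_morton_order height width → Pre_morton_order height width → Spec_morton_order height width (morton_order height width)

-- ===== LEMMAS AND PROOFS =====

-- OR of a number with a single higher bit is addition.
theorem pv_lor_two_pow_of_lt : ∀ (j a : Nat), a < 2 ^ j → a ||| 2 ^ j = a + 2 ^ j := by
  intro j
  induction j with
  | zero => intro a ha; interval_cases a; decide
  | succ j ih =>
    intro a ha
    have h2 : a / 2 < 2 ^ j := by rw [pow_succ] at ha; omega
    have e1 : a = Nat.bit (a % 2 = 1) (a / 2) := by
      rw [Nat.bit_val]; rcases Nat.mod_two_eq_zero_or_one a with h | h <;> simp [h] <;> omega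
    have e2 : (2 : Nat) ^ (j + 1) = Nat.bit false (2 ^ j) := by
      rw [Nat.bit_val]; simp [pow_succ]; ring
    rw [e1, e2, Nat.lor_bit, ih _ h2, Nat.bit_val, Nat.bit_val]
    rcases Nat.mod_two_eq_zero_or_one a with h | h <;> simp [h] <;> omega

-- (y, x) of the first k bit pairs of a Morton index (reference decoder for the proof).
def decR : Nat → Nat → Nat × Nat
  | 0, _ => (0, 0)
  | k + 1, z => (2 * (decR k (z / 4)).1 + z / 2 % 2, 2 * (decR k (z / 4)).2 + z % 2)

theorem decR_lt : ∀ (k z : Nat), (decR k z).1 < 2 ^ k ∧ (decR k z).2 < 2 ^ k := by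
  intro k
  induction k with
  | zero => intro z; simp [decR]
  | succ k ih =>
    intro z
    have := ih (z / 4)
    simp only [decR, pow_succ]
    omega

theorem decR_top : ∀ (k z : Nat), decR (k + 1) z =
    ((decR k z).1 + z / 2 ^ (2 * k + 1) % 2 * 2 ^ k, (decR k z).2 + z / 2 ^ (2 * k) % 2 * 2 ^ k) := by
  intro k
  induction k with
  | zero => intro z; simp [decR]
  | succ k ih =>
    intro z
    have e1 : z / 4 / 2 ^ (2 * k + 1) = z / 2 ^ (2 * (k + 1) + 1) := by
      rw [Nat.div_div_eq_div_mul]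
      congr 1
      rw [show 2 * (k + 1) + 1 = (2 * k + 1) + 2 by ring, pow_add]
      ring
    have e2 : z / 4 / 2 ^ (2 * k) = z / 2 ^ (2 * (k + 1)) := by
      rw [Nat.div_div_eq_div_mul]
      congr 1
      rw [show 2 * (k + 1) = 2 * k + 2 by ring, pow_add]
      ring
    have l : decR (k + 1 + 1) z = (2 * (decR (k+1) (z / 4)).1 + z / 2 % 2, 2 * (decR (k+1) (z / 4)).2 + z % 2) := rfl
    have r : decR (k + 1) z = (2 * (decR k (z / 4)).1 + z / 2 % 2, 2 * (decR k (z / 4)).2 + z % 2) := rfl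
    rw [l, ih (z / 4), r, e1, e2]
    simp only [Prod.mk.injEq]
    constructor <;> ring

theorem decR_mod : ∀ (k z : Nat), decR k (z % 4 ^ k) = decR k z := by
  intro k
  induction k with
  | zero => intro z; rfl
  | succ k ih =>
    intro z
    have h4 : (4 : Nat) ^ (k + 1) = 4 * 4 ^ k := by ring
    have hd4 : z % 4 ^ (k + 1) / 4 = z / 4 % 4 ^ k := by
      rw [h4]; exact Nat.mod_mul_right_div_self z 4 (4 ^ k)
    have hm2 : z % 4 ^ (k + 1) % 2 = z % 2 := by
      apply Nat.mod_mod_of_dvd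
      exact Dvd.dvd.trans (by norm_num) (dvd_pow_self 4 (Nat.succ_ne_zero k))
    have hm2' : z % 4 ^ (k + 1) / 2 % 2 = z / 2 % 2 := by
      have : z % 4 ^ (k + 1) / 2 = z / 2 % (2 * 4 ^ k) := by
        rw [show (4:Nat) ^ (k+1) = 2 * (2 * 4 ^ k) by ring]
        exact Nat.mod_mul_right_div_self z 2 (2 * 4 ^ k)
      rw [this]
      apply Nat.mod_mod_of_dvd
      exact Dvd.dvd.trans (by norm_num) (Dvd.intro (4 ^ k) rfl)
    simp only [decR, hd4, hm2, hm2', ih (z / 4)]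

theorem decR_trunc : ∀ (m k z : Nat), z < 4 ^ k → decR (k + m) z = decR k z := by
  intro m
  induction m with
  | zero => intro k z _; rfl
  | succ m ih =>
    intro k z hz
    have hlt : z < 2 ^ (2 * (k + m)) := by
      calc z < 4 ^ k := hz
        _ ≤ 4 ^ (k + m) := Nat.pow_le_pow_right (by norm_num) (by omega)
        _ = 2 ^ (2 * (k + m)) := by rw [show (4:Nat) = 2^2 by norm_num, ← pow_mul]
    have h0 : z / 2 ^ (2 * (k + m)) = 0 := Nat.div_eq_of_lt hlt
    have h1 : z / 2 ^ (2 * (k + m) + 1) = 0 := by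
      apply Nat.div_eq_of_lt
      calc z < 2 ^ (2 * (k + m)) := hlt
        _ ≤ 2 ^ (2 * (k + m) + 1) := Nat.pow_le_pow_right (by norm_num) (by omega)
    rw [show k + (m + 1) = (k + m) + 1 by ring, decR_top, h0, h1]
    simp [ih k z hz]

theorem decR_quad : ∀ (k q s : Nat), q < 4 → s < 4 ^ k →
    decR (k + 1) (q * 4 ^ k + s) =
      ((decR k s).1 + q / 2 * 2 ^ k, (decR k s).2 + q % 2 * 2 ^ k) := by
  intro k q s hq hs
  have h4 : (4 : Nat) ^ k = 2 ^ (2 * k) := by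
    rw [show (4:Nat) = 2^2 by norm_num, ← pow_mul]
  have hmod : (q * 4 ^ k + s) % 4 ^ k = s := by
    simp [Nat.mod_eq_of_lt hs]
  have hdiv : (q * 4 ^ k + s) / 2 ^ (2 * k) = q := by
    rw [← h4, Nat.add_comm, Nat.add_mul_div_right _ _ (by positivity : 0 < (4:Nat) ^ k),
      Nat.div_eq_of_lt hs, Nat.zero_add]
  have hdiv1 : (q * 4 ^ k + s) / 2 ^ (2 * k + 1) = q / 2 := by
    rw [pow_succ, ← Nat.div_div_eq_div_mul, hdiv]
  rw [decR_top, ← decR_mod k (q * 4 ^ k + s), hmod, hdiv, hdiv1]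
  have : q / 2 % 2 = q / 2 := Nat.mod_eq_of_lt (by omega)
  rw [this]

-- one masked-shift term of A's decode loop, as a Nat bit extraction
theorem pv_shift_term (z m s : Nat) (h : s ≤ m) :
    (PySem.Int.band (z : Int) ((1 : Int) <<< m)) >>> s = ((z / 2 ^ m % 2 * 2 ^ (m - s) : Nat) : Int) := by
  have e1 : ((1 : Int) <<< m) = ((2 ^ m : Nat) : Int) := by
    rw [Int.shiftLeft_eq, one_mul]; push_cast; rfl
  rw [e1, PySem.Int.band_natCast, Nat.and_two_pow, ← Int.natCast_shiftRight]
  congr 1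
  rw [Nat.shiftRight_eq_div_pow, Nat.mul_div_assoc _ (pow_dvd_pow 2 h), Nat.pow_div h (by norm_num)]
  rw [Nat.testBit_eq_decide_div_mod_eq]
  rcases Nat.mod_two_eq_zero_or_one (z / 2 ^ m) with hb | hb <;> simp [hb]

theorem decodeA_fold (z : Nat) : ∀ j : Nat,
    (List.range j).foldl
      (fun (p : Int × Int) (i : Nat) =>
        (PySem.Int.bor p.1 ((PySem.Int.band (z : Int) ((1 : Int) <<< (2 * i))) >>> i),
         PySem.Int.bor p.2 ((PySem.Int.band (z : Int) ((1 : Int) <<< (2 * i + 1))) >>> (i + 1))))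
      ((0 : Int), (0 : Int))
    = (((decR j z).2 : Int), ((decR j z).1 : Int)) := by
  intro j
  induction j with
  | zero => simp [decR]
  | succ j ih =>
    rw [List.range_succ, List.foldl_append, ih]
    simp only [List.foldl_cons, List.foldl_nil]
    rw [pv_shift_term z (2 * j) j (by omega), pv_shift_term z (2 * j + 1) (j + 1) (by omega)]
    have ej : 2 * j - j = j := by omega
    have ej1 : 2 * j + 1 - (j + 1) = j := by omega
    rw [ej, ej1, PySem.Int.bor_natCast, PySem.Int.bor_natCast, decR_top]
    have hx := (decR_lt j z).2
    have hy := (decR_lt j z).1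
    have disj : ∀ a b : Nat, a < 2 ^ j → b ≤ 1 → a ||| b * 2 ^ j = a + b * 2 ^ j := by
      intro a b ha hb
      interval_cases b
      · simp
      · simpa using pv_lor_two_pow_of_lt j a ha
    rw [disj _ _ hx (by omega), disj _ _ hy (by omega)]

theorem decodeA_eq (z : Nat) :
    mortonDecodeA (z : Int) = (((decR 16 z).1 : Int), ((decR 16 z).2 : Int)) := by
  simp only [mortonDecodeA]
  rw [decodeA_fold z 16]

theorem pv_filter_map_eq_filterMap {α β : Type} (p : α → Prop) [DecidablePred p] (f : α → β) (l : List α) :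
    (l.filter (fun x => decide (p x))).map f = l.filterMap (fun x => if p x then some (f x) else none) := by
  induction l with
  | nil => rfl
  | cons a l ih => by_cases h : p a <;> simp [h, ih]

-- B's quadrant recursion at size 2^k over offset (y0, x0) = the k-bit Morton cells, filtered
theorem zQuad_eq : ∀ (k : Nat) (y0 x0 : Nat) (hgt wdt : Int),
    zQuadrants ((2 : Int) ^ k) (y0 : Int) (x0 : Int) hgt wdt =
      (List.range (4 ^ k)).filterMap (fun s =>
        if ((y0 + (decR k s).1 : Nat) : Int) < hgt ∧ ((x0 + (decR k s).2 : Nat) : Int) < wdt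
        then some (((y0 + (decR k s).1 : Nat) : Int), ((x0 + (decR k s).2 : Nat) : Int))
        else none) := by
  intro k
  induction k with
  | zero =>
    intro y0 x0 hgt wdt
    rw [zQuadrants]
    simp only [pow_zero, List.range_one, List.filterMap, decR]
    split_ifs with h1 h2 h3 <;> simp_all <;> omega
  | succ k ih =>
    intro y0 x0 hgt wdt
    rw [zQuadrants]
    have h2k : (2:Int) ≤ 2 ^ (k + 1) := by
      calc (2:Int) = 2 ^ 1 := (pow_one 2).symm
        _ ≤ 2 ^ (k + 1) := pow_le_pow_right₀ (by norm_num) (by omega)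
    have hgt1 : ¬ ((2:Int) ^ (k + 1) ≤ 1) := by omega
    have hfd : PySem.Int.floordiv ((2:Int) ^ (k + 1)) 2 = (2:Int) ^ k := by
      rw [PySem.Int.floordiv_eq_ediv_of_pos (by norm_num), pow_succ,
        Int.mul_ediv_cancel _ (by norm_num)]
    by_cases hp : (y0:Int) ≥ hgt ∨ (x0:Int) ≥ wdt
    · rw [if_pos hp]
      symm
      rw [List.filterMap_eq_nil_iff]
      intro s _
      have hcond : ¬ (((y0 + (decR (k+1) s).1 : Nat) : Int) < hgt ∧
          ((x0 + (decR (k+1) s).2 : Nat) : Int) < wdt) := by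
        push_cast
        rcases hp with h | h
        · intro hc; have := hc.1; omega
        · intro hc; have := hc.2; omega
      exact if_neg hcond
    · rw [if_neg hp, if_neg hgt1]
      simp only [hfd]
      have c1 : (x0:Int) + (2:Int) ^ k = ((x0 + 2 ^ k : Nat) : Int) := by push_cast; ring
      have c2 : (y0:Int) + (2:Int) ^ k = ((y0 + 2 ^ k : Nat) : Int) := by push_cast; ring
      rw [c1, c2, ih y0 x0, ih y0 (x0 + 2 ^ k), ih (y0 + 2 ^ k) x0, ih (y0 + 2 ^ k) (x0 + 2 ^ k)]
      have hsplit : (4:Nat) ^ (k + 1) = 4 ^ k + (4 ^ k + (4 ^ k + 4 ^ k)) := by ring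
      rw [hsplit, List.range_add, List.range_add, List.range_add]
      simp only [List.filterMap_append, List.filterMap_map, List.append_assoc]
      congr 1
      · apply List.filterMap_congr
        intro s hs
        have hs' := List.mem_range.mp hs
        have e := decR_trunc 1 k s hs'
        rw [show k + 1 = k + 1 from rfl] at e
        rw [e]
      congr 1
      · apply List.filterMap_congr
        intro s hs
        have hs' := List.mem_range.mp hs
        show _ = (fun t => _) (4 ^ k + s)
        simp only [Function.comp]
        rw [show 4 ^ k + s = 1 * 4 ^ k + s by ring, decR_quad k 1 s (by norm_num) hs']
        push_cast
        ring_nf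
      congr 1
      · apply List.filterMap_congr
        intro s hs
        have hs' := List.mem_range.mp hs
        simp only [Function.comp]
        rw [show 4 ^ k + (4 ^ k + s) = 2 * 4 ^ k + s by ring, decR_quad k 2 s (by norm_num) hs']
        push_cast
        ring_nf
      · apply List.filterMap_congr
        intro s hs
        have hs' := List.mem_range.mp hs
        simp only [Function.comp]
        rw [show 4 ^ k + (4 ^ k + (4 ^ k + s)) = 3 * 4 ^ k + s by ring,
          decR_quad k 3 s (by norm_num) hs']
        push_cast
        ring_nf

theorem pvGrow_spec (m : Int) (hm : m ≤ 65536) :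
    ∃ K : Nat, K ≤ 16 ∧ pvGrow m 1 = (2 : Int) ^ K ∧ m ≤ (2 : Int) ^ K := by
  suffices h : ∀ d j : Nat, j ≤ 16 → 16 - j ≤ d →
      ∃ K : Nat, K ≤ 16 ∧ pvGrow m ((2:Int) ^ j) = (2 : Int) ^ K ∧ m ≤ (2 : Int) ^ K by
    simpa using h 16 0 (by omega) (by omega)
  intro d
  induction d with
  | zero =>
    intro j hj hd
    have hj16 : j = 16 := by omega
    subst hj16
    have h16 : (2:Int) ^ 16 = 65536 := by norm_num
    refine ⟨16, le_refl 16, ?_, by rw [h16]; exact hm⟩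
    rw [pvGrow, dif_neg]
    push_neg
    intro _
    rw [h16]
    exact hm
  | succ d ihd =>
    intro j hj hd
    by_cases hc : (0:Int) < 2 ^ j ∧ (2:Int) ^ j < m
    · have hj16 : j < 16 := by
        by_contra hcon
        have hj' : j = 16 := by omega
        subst hj'
        have h16 : (2:Int) ^ 16 = 65536 := by norm_num
        omega
      rw [pvGrow, dif_pos hc, show (2:Int) ^ j * 2 = 2 ^ (j + 1) from (pow_succ 2 j).symm]
      exact ihd (j + 1) (by omega) (by omega)
    · rw [pvGrow, dif_neg hc]
      refine ⟨j, hj, rfl, ?_⟩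
      have hpos : (0:Int) < 2 ^ j := by positivity
      push_neg at hc
      exact hc hpos

-- ===== VERDICT (by name: the statement is the Claim_ definition above) =====
theorem morton_order_spec : Claim_equal_morton_order := by
  unfold Claim_equal_morton_order Spec_morton_order Pre_morton_order
  intro height width _dom hpre
  obtain ⟨hh, hw⟩ := hpre
  obtain ⟨K, hK, hg, _⟩ := pvGrow_spec (max height width) (max_le hh hw)
  simp only [morton_order, morton_order_alt]
  rw [hg]
  have hnn : (2:Int) ^ K * 2 ^ K = ((4 ^ K : Nat) : Int) := by
    push_cast
    rw [show (4:Int) = 2 * 2 by norm_num, mul_pow]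
  rw [hnn, PySem.List.pyRange_zero_nat, List.foldl_map]
  have hfold := PySem.List.foldl_append_if
    (fun s : Nat => decide ((mortonDecodeA (s:Int)).1 < height ∧ (mortonDecodeA (s:Int)).2 < width))
    (fun s : Nat => mortonDecodeA (s:Int)) (List.range (4 ^ K)) []
  simp only [decide_eq_true_eq] at hfold
  rw [hfold, List.nil_append, pv_filter_map_eq_filterMap]
  have hz := zQuad_eq K 0 0 height width
  simp only [Nat.cast_zero, Nat.zero_add] at hz
  rw [hz]
  apply List.filterMap_congr
  intro s hs
  have hs' := List.mem_range.mp hs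
  have h16 : decR 16 s = decR K s := by
    have h := decR_trunc (16 - K) K s hs'
    rwa [show K + (16 - K) = 16 by omega] at h
  rw [decodeA_eq s, h16]
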